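-- pv_equiv track=rewrite | github.com/G-P-git-code/gjrc | first.py | collect_codey_lines
-- ===== SOURCE A (Python) =====
-- from typing import Dict, Optional, List, Tuple
--
-- def collect_codey_lines(text: str) -> Optional[str]:
--     kws = ("import", "def ", "for ", "while ", "if ", "=", "print", "return")
--     lines, in_block = [], False
--     for ln in text.splitlines():
--         s = ln.strip()
--         if (not in_block) and any(k in s for k in kws):
--             in_block = True
--         if in_block and s:
--             lines.append(ln)
--     code = "\n".join(lines).strip()
--     return code if len(code) >= 4 else None
-- ===== SOURCE B (Python) =====
-- def collect_codey_lines(text):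
--     kws = ("import", "def ", "for ", "while ", "if ", "=", "print", "return")
--     lines = text.splitlines()
--     hits = [any(k in ln.strip() for k in kws) for ln in lines]
--     keep = [ln for i, ln in enumerate(lines)
--             if ln.strip() and any(hits[:i + 1])]
--     code = "\n".join(keep).strip()
--     return code if len(code) >= 4 else None
-- ===== Notes on version B (the rewrite author's own statement) =====
-- stated objective: alternative
-- what changed: Replaces A's latched in_block flag (sequential stateful scan) by a stateless formulation: precompute a per-line keyword-hit list, then keep each non-blank line iff any hit occurs in its prefix hits[:i+1] ; no flag and no sequential state, at the cost of a quadratic prefix check.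
import Mathlib
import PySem

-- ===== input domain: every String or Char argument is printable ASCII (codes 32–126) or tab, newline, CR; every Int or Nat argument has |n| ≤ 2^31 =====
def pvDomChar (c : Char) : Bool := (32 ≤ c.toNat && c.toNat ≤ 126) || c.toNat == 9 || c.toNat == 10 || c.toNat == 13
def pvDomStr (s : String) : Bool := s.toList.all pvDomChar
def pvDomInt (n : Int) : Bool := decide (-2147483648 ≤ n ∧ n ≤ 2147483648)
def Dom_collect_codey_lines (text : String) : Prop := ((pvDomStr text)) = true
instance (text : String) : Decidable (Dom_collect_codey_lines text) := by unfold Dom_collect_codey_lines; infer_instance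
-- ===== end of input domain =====

-- B replaces A's latched in_block flag by a stateless prefix-hit formulation (alternative, not faster; return value only, no mutation).

-- ===== PORT A =====
def pvKws : List String := ["import", "def ", "for ", "while ", "if ", "=", "print", "return"]

-- the body of A's for-loop over the state (lines, in_block)
def pvStepA (st : List String × Bool) (ln : String) : List String × Bool :=
  let s := PySem.Str.strip ln
  let inb := if (!st.2) && pvKws.any (fun k => PySem.Str.isIn k s) then true else st.2
  if inb && s != "" then (st.1 ++ [ln], inb) else (st.1, inb)

def collect_codey_lines (text : String) : Option String :=
  let st := (PySem.Str.splitlines text).foldl pvStepA ([], false)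
  let code := PySem.Str.strip (PySem.Str.join "\n" st.1)
  if PySem.Str.len code ≥ 4 then some code else none

-- ===== PORT B =====
def collect_codey_lines_alt (text : String) : Option String :=
  let lines := PySem.Str.splitlines text
  let hits := lines.map (fun ln => pvKws.any (fun k => PySem.Str.isIn k (PySem.Str.strip ln)))
  let keep := ((PySem.List.enumerate lines).filter
      (fun p => PySem.Str.strip p.2 != "" &&
        (PySem.List.slice hits none (some (p.1 + 1))).any id)).map Prod.snd
  let code := PySem.Str.strip (PySem.Str.join "\n" keep)
  if PySem.Str.len code ≥ 4 then some code else none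

-- ===== PRECONDITION & SPEC =====
def Spec_collect_codey_lines (text : String) (out : Option String) : Prop := out = collect_codey_lines_alt text
instance (text : String) (out : Option String) : Decidable (Spec_collect_codey_lines text out) := by unfold Spec_collect_codey_lines; infer_instance

-- ===== CLAIM (what is proved, stated in full; the proofs are below) =====
def Claim_equal_collect_codey_lines : Prop := ∀ (text : String), Dom_collect_codey_lines text → Spec_collect_codey_lines text (collect_codey_lines text)

-- ===== LEMMAS AND PROOFS =====

def pvMatches (ln : String) : Bool := pvKws.any (fun k => PySem.Str.isIn k (PySem.Str.strip ln))

-- the common reference: lines kept from ls when the flag entering ls is b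
def pvCore : List String → Bool → List String
  | [], _ => []
  | h :: t, b =>
    let b' := b || pvMatches h
    (if b' && PySem.Str.strip h != "" then [h] else []) ++ pvCore t b'

-- A's fold realises pvCore
theorem pv_fold (ls : List String) (b : Bool) (acc : List String) :
    ls.foldl pvStepA (acc, b) = (acc ++ pvCore ls b, b || ls.any pvMatches) := by
  induction ls generalizing b acc with
  | nil => simp [pvCore]
  | cons h t ih =>
    have hstep : pvStepA (acc, b) h =
        (acc ++ (if (b || pvMatches h) && PySem.Str.strip h != "" then [h] else []),
         b || pvMatches h) := by
      simp only [pvStepA]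
      rw [show (pvKws.any fun k => PySem.Str.isIn k (PySem.Str.strip h)) = pvMatches h from rfl]
      cases b <;> cases hm : pvMatches h <;>
        by_cases hs : PySem.Str.strip h != "" <;> simp [hs]
    simp only [List.foldl_cons, hstep, ih, pvCore, List.any_cons]
    by_cases hc : (b || pvMatches h) && PySem.Str.strip h != "" <;>
      simp_all [Bool.or_assoc, List.append_assoc]

theorem pv_enumerate_shift {α : Type} (ls : List α) (s : Int) :
    PySem.List.enumerate ls (s + 1) =
      (PySem.List.enumerate ls s).map (fun p => (p.1 + 1, p.2)) := by
  induction ls generalizing s with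
  | nil => simp [PySem.List.enumerate_nil]
  | cons h t ih => simp [PySem.List.enumerate_cons, ih]

-- B's stateless prefix-hit filter realises pvCore
theorem pv_filter (ls : List String) (b : Bool) :
    (((PySem.List.enumerate ls 0).filter
        (fun p => PySem.Str.strip p.2 != "" &&
          (b || (PySem.List.slice (ls.map pvMatches) none (some (p.1 + 1))).any id))).map
      Prod.snd) = pvCore ls b := by
  induction ls generalizing b with
  | nil => simp [PySem.List.enumerate_nil, pvCore]
  | cons h t ih =>
    rw [PySem.List.enumerate_cons]
    have h01 : (0 : Int) + 1 = ((1 : Nat) : Int) := by norm_num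
    have hhead : PySem.List.slice ((h :: t).map pvMatches) none (some ((0 : Int) + 1)) =
        [pvMatches h] := by
      rw [h01, PySem.List.slice_to_natCast]; simp
    have hcongr : ∀ p ∈ PySem.List.enumerate t 0,
        (fun p => PySem.Str.strip p.2 != "" &&
          (b || (PySem.List.slice ((h :: t).map pvMatches) none (some (p.1 + 1 + 1))).any id)) p =
        (fun p => PySem.Str.strip p.2 != "" &&
          ((b || pvMatches h) ||
            (PySem.List.slice (t.map pvMatches) none (some (p.1 + 1))).any id)) p := by
      intro p hp
      obtain ⟨k, hk, rfl⟩ := (PySem.List.mem_enumerate_iff t 0 p).1 hp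
      have e2 : ((k : Int) + 1 + 1) = ((k + 2 : Nat) : Int) := by push_cast; ring
      have e1 : ((k : Int) + 1) = ((k + 1 : Nat) : Int) := by push_cast; ring
      simp only [zero_add]
      simp only [e2]
      simp only [e1]
      simp only [PySem.List.slice_to_natCast, List.map_cons]
      simp [Bool.or_assoc]
    rw [pv_enumerate_shift, List.filter_cons]
    simp only [List.filter_map, Function.comp_def]
    rw [List.filter_congr hcongr]
    simp only [apply_ite (List.map Prod.snd), List.map_cons, List.map_map, Function.comp_def]
    rw [show (fun p : Int × String => p.2) = Prod.snd from rfl, ih (b || pvMatches h)]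
    simp only [pvCore]
    by_cases hs : PySem.Str.strip h != "" <;> by_cases hb : (b || pvMatches h) = true <;>
      simp_all [Bool.and_comm]

-- ===== VERDICT (by name: the statement is the Claim_ definition above) =====
theorem collect_codey_lines_spec : Claim_equal_collect_codey_lines := by
  intro text _
  unfold Spec_collect_codey_lines collect_codey_lines collect_codey_lines_alt
  rw [pv_fold (PySem.Str.splitlines text) false []]
  have := pv_filter (PySem.Str.splitlines text) false
  simp only [Bool.false_or] at this
  simp only [List.nil_append]
  rw [show (fun ln => pvKws.any fun k => PySem.Str.isIn k (PySem.Str.strip ln)) = pvMatches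
      from rfl, ← this]
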